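-- pv_equiv track=rewrite | github.com/Mr-Harsh-Dixit/Project_Euler_Solutions | Python/Problem_091.py | euler_91
-- ===== SOURCE A (Python) =====
-- import math
--
-- def max_steps(x, y, dx, dy, N):
--     INF = 10**18
--     lim = INF
--     if dx > 0: lim = min(lim, (N - x) // dx)
--     elif dx < 0: lim = min(lim, x // (-dx))
--     if dy > 0: lim = min(lim, (N - y) // dy)
--     elif dy < 0: lim = min(lim, y // (-dy))
--     return 0 if lim == INF else lim
--
-- def euler_91(N=50):
--     ans = N * N  # right angle at origin
--     for x in range(N + 1):
--         for y in range(N + 1):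
--             if x == 0 and y == 0:
--                 continue
--             g = math.gcd(x, y)
--             dx = -y // g
--             dy =  x // g
--             ans += max_steps(x, y, dx, dy, N)
--             ans += max_steps(x, y, -dx, -dy, N)
--     return ans
-- ===== SOURCE B (Python) =====
-- from math import gcd
--
-- def euler_91(N=50):
--     # 3*N*N closed form: right angle at the origin (N*N) plus right angles at
--     # axis points (N for each of the 2*N axis points).  For interior points the
--     # two perpendicular ray counts are symmetric under (x, y) <-> (y, x), so sum
--     # one of them and double it.
--     ans = 3 * N * N
--     for x in range(1, N + 1):
--         for y in range(1, N + 1):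
--             g = gcd(x, y)
--             ans += 2 * min(x * g // y, (N - y) * g // x)
--     return ans
-- ===== Notes on version B (the rewrite author's own statement) =====
-- stated objective: simpler
-- what changed: B replaces A's general direction-clamping helper max_steps and its loop over the whole (N+1)x(N+1) grid (origin and axis points included) by the closed form 3*N*N for the origin/axis right angles plus a single gcd-based min formula per interior point, doubled via the (x,y)<->(y,x) symmetry instead of computing both perpendicular directions.
-- outside the precondition, e.g. on euler_91(-1): A returns 1, B returns 3
import Mathlib
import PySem

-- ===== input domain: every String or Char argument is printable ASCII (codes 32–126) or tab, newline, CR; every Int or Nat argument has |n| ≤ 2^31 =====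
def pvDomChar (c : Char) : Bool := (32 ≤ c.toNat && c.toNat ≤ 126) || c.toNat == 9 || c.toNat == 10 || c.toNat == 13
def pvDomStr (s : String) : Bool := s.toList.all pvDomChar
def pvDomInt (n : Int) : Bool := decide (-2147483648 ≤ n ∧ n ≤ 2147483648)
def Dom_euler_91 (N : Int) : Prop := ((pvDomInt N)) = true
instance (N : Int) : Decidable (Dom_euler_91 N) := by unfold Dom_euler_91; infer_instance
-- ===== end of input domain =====

-- B replaces A's per-point perpendicular-direction stepping (helper max_steps, grid
-- including axes and origin) by the closed form 3*N*N for origin/axis right angles plus a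
-- single symmetric min-formula doubled over the interior points; objective: simpler.

-- ===== PORT A =====
def max_steps (x y dx dy N : Int) : Int :=
  let INF : Int := 10 ^ 18
  let lim0 := INF
  let lim1 := if dx > 0 then min lim0 (PySem.Int.floordiv (N - x) dx)
              else if dx < 0 then min lim0 (PySem.Int.floordiv x (-dx))
              else lim0
  let lim2 := if dy > 0 then min lim1 (PySem.Int.floordiv (N - y) dy)
              else if dy < 0 then min lim1 (PySem.Int.floordiv y (-dy))
              else lim1
  if lim2 = INF then 0 else lim2

def euler_91 (N : Int) : Int :=
  (PySem.List.pyRange 0 (N + 1) 1).foldl (fun ans x =>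
    (PySem.List.pyRange 0 (N + 1) 1).foldl (fun ans y =>
      if x = 0 ∧ y = 0 then ans
      else
        let g : Int := Int.gcd x y
        let dx := PySem.Int.floordiv (-y) g
        let dy := PySem.Int.floordiv x g
        ans + max_steps x y dx dy N + max_steps x y (-dx) (-dy) N) ans) (N * N)

-- ===== PORT B =====
def euler_91_alt (N : Int) : Int :=
  (PySem.List.pyRange 1 (N + 1) 1).foldl (fun ans x =>
    (PySem.List.pyRange 1 (N + 1) 1).foldl (fun ans y =>
      let g : Int := Int.gcd x y
      ans + 2 * min (PySem.Int.floordiv (x * g) y) (PySem.Int.floordiv ((N - y) * g) x)) ans)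
    (3 * N * N)

-- ===== PRECONDITION & SPEC =====
-- Pre_ excludes negative N, which is outside the problem's natural domain (N is a grid
-- size): there both loops are empty and neither program's leftover initial value (A: N*N,
-- B: 3*N*N) is a meaningful triangle count.
def Pre_euler_91 (N : Int) : Prop := 0 ≤ N
instance (N : Int) : Decidable (Pre_euler_91 N) := by unfold Pre_euler_91; infer_instance
def pvWitness_euler_91 : Int := 4

def Spec_euler_91 (N : Int) (out : Int) : Prop := out = euler_91_alt N
instance (N : Int) (out : Int) : Decidable (Spec_euler_91 N out) := by unfold Spec_euler_91; infer_instance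

-- ===== CLAIM (what is proved, stated in full; the proofs are below) =====
def Claim_equal_euler_91 : Prop := ∀ (N : Int), Dom_euler_91 N → Pre_euler_91 N → Spec_euler_91 N (euler_91 N)

-- ===== LEMMAS AND PROOFS =====

-- the body of A's inner loop, as a summand
def fA (N x y : Int) : Int :=
  if x = 0 ∧ y = 0 then 0
  else
    let g : Int := Int.gcd x y
    let dx := PySem.Int.floordiv (-y) g
    let dy := PySem.Int.floordiv x g
    max_steps x y dx dy N + max_steps x y (-dx) (-dy) N

-- one of the two perpendicular ray counts, as B computes it
def mB (N x y : Int) : Int :=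
  min (PySem.Int.floordiv (x * (Int.gcd x y : Int)) y)
      (PySem.Int.floordiv ((N - y) * (Int.gcd x y : Int)) x)

lemma inner_foldl_eq (N x : Int) (l : List Int) (ans : Int) :
    l.foldl (fun ans y =>
      if x = 0 ∧ y = 0 then ans
      else
        let g : Int := Int.gcd x y
        let dx := PySem.Int.floordiv (-y) g
        let dy := PySem.Int.floordiv x g
        ans + max_steps x y dx dy N + max_steps x y (-dx) (-dy) N) ans
    = ans + (l.map (fun y => fA N x y)).sum := by
  have h : (fun (ans y : Int) =>
      if x = 0 ∧ y = 0 then ans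
      else
        let g : Int := Int.gcd x y
        let dx := PySem.Int.floordiv (-y) g
        let dy := PySem.Int.floordiv x g
        ans + max_steps x y dx dy N + max_steps x y (-dx) (-dy) N)
      = (fun ans y => ans + fA N x y) := by
    funext ans y
    by_cases h : x = 0 ∧ y = 0 <;> simp [fA, h, add_assoc]
  rw [h, PySem.List.foldl_add]

lemma euler_91_eq_sum (N : Int) :
    euler_91 N = N * N +
      ((PySem.List.pyRange 0 (N + 1) 1).map (fun x =>
        ((PySem.List.pyRange 0 (N + 1) 1).map (fun y => fA N x y)).sum)).sum := by
  unfold euler_91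
  refine (PySem.List.foldl_congr_mem _ _ _ _ ?_).trans
    (PySem.List.foldl_add (PySem.List.pyRange 0 (N + 1) 1)
      (fun x => ((PySem.List.pyRange 0 (N + 1) 1).map (fun y => fA N x y)).sum) (N * N))
  intro ans x _
  exact inner_foldl_eq N x (PySem.List.pyRange 0 (N + 1) 1) ans

lemma euler_91_alt_eq_sum (N : Int) :
    euler_91_alt N = 3 * N * N +
      ((PySem.List.pyRange 1 (N + 1) 1).map (fun x =>
        ((PySem.List.pyRange 1 (N + 1) 1).map (fun y => 2 * mB N x y)).sum)).sum := by
  unfold euler_91_alt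
  refine (PySem.List.foldl_congr_mem _ _ _ _ ?_).trans
    (PySem.List.foldl_add (PySem.List.pyRange 1 (N + 1) 1)
      (fun x => ((PySem.List.pyRange 1 (N + 1) 1).map (fun y => 2 * mB N x y)).sum) (3 * N * N))
  intro ans x _
  exact PySem.List.foldl_add (PySem.List.pyRange 1 (N + 1) 1) (fun y => 2 * mB N x y) ans

lemma max_steps_eval_np (x y dx dy N : Int) (hdx : dx < 0) (hdy : 0 < dy)
    (h0 : 0 ≤ x) (hlt : x ≤ 2147483648) :
    max_steps x y dx dy N = min (x / (-dx)) ((N - y) / dy) := by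
  have hq : x / (-dx) ≤ x := Int.ediv_le_self _ h0
  have hx18 : x < (10:Int) ^ 18 := lt_of_le_of_lt hlt (by norm_num)
  simp only [max_steps]
  rw [if_neg (by omega : ¬ dx > 0), if_pos hdx, if_pos hdy,
      PySem.Int.floordiv_eq_ediv_of_pos (by omega : (0:Int) < -dx),
      PySem.Int.floordiv_eq_ediv_of_pos hdy]
  rw [min_eq_right (by linarith : x / (-dx) ≤ (10:Int) ^ 18)]
  rw [if_neg (by
    intro h
    have hm := min_le_left (x / (-dx)) ((N - y) / dy)
    rw [h] at hm
    linarith)]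

lemma max_steps_eval_pn (x y dx dy N : Int) (hdx : 0 < dx) (hdy : dy < 0)
    (h0 : 0 ≤ N - x) (hlt : N - x ≤ 2147483648) :
    max_steps x y dx dy N = min ((N - x) / dx) (y / (-dy)) := by
  have hq : (N - x) / dx ≤ N - x := Int.ediv_le_self _ h0
  have hx18 : N - x < (10:Int) ^ 18 := lt_of_le_of_lt hlt (by norm_num)
  simp only [max_steps]
  rw [if_pos hdx, if_neg (by omega : ¬ dy > 0), if_pos hdy,
      PySem.Int.floordiv_eq_ediv_of_pos hdx,
      PySem.Int.floordiv_eq_ediv_of_pos (by omega : (0:Int) < -dy)]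
  rw [min_eq_right (by linarith : (N - x) / dx ≤ (10:Int) ^ 18)]
  rw [if_neg (by
    intro h
    have hm := min_le_left ((N - x) / dx) (y / (-dy))
    rw [h] at hm
    linarith)]

lemma max_steps_eval_n0 (x y dx N : Int) (hdx : dx < 0)
    (h0 : 0 ≤ x) (hlt : x ≤ 2147483648) :
    max_steps x y dx 0 N = x / (-dx) := by
  have hq : x / (-dx) ≤ x := Int.ediv_le_self _ h0
  have hx18 : x < (10:Int) ^ 18 := lt_of_le_of_lt hlt (by norm_num)
  simp only [max_steps]
  rw [if_neg (by omega : ¬ dx > 0), if_pos hdx, if_neg (by omega : ¬ (0:Int) > 0),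
      if_neg (by omega : ¬ (0:Int) < 0),
      PySem.Int.floordiv_eq_ediv_of_pos (by omega : (0:Int) < -dx)]
  rw [min_eq_right (by linarith : x / (-dx) ≤ (10:Int) ^ 18)]
  rw [if_neg (by intro h; linarith [h ▸ hq])]

lemma max_steps_eval_p0 (x y dx N : Int) (hdx : 0 < dx)
    (h0 : 0 ≤ N - x) (hlt : N - x ≤ 2147483648) :
    max_steps x y dx 0 N = (N - x) / dx := by
  have hq : (N - x) / dx ≤ N - x := Int.ediv_le_self _ h0
  have hx18 : N - x < (10:Int) ^ 18 := lt_of_le_of_lt hlt (by norm_num)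
  simp only [max_steps]
  rw [if_pos hdx, if_neg (by omega : ¬ (0:Int) > 0), if_neg (by omega : ¬ (0:Int) < 0),
      PySem.Int.floordiv_eq_ediv_of_pos hdx]
  rw [min_eq_right (by linarith : (N - x) / dx ≤ (10:Int) ^ 18)]
  rw [if_neg (by intro h; linarith [h ▸ hq])]

lemma max_steps_eval_0p (x y dy N : Int) (hdy : 0 < dy)
    (h0 : 0 ≤ N - y) (hlt : N - y ≤ 2147483648) :
    max_steps x y 0 dy N = (N - y) / dy := by
  have hq : (N - y) / dy ≤ N - y := Int.ediv_le_self _ h0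
  have hx18 : N - y < (10:Int) ^ 18 := lt_of_le_of_lt hlt (by norm_num)
  simp only [max_steps]
  rw [if_neg (by omega : ¬ (0:Int) > 0), if_neg (by omega : ¬ (0:Int) < 0), if_pos hdy,
      PySem.Int.floordiv_eq_ediv_of_pos hdy]
  rw [min_eq_right (by linarith : (N - y) / dy ≤ (10:Int) ^ 18)]
  rw [if_neg (by intro h; linarith [h ▸ hq])]

lemma max_steps_eval_0n (x y dy N : Int) (hdy : dy < 0)
    (h0 : 0 ≤ y) (hlt : y ≤ 2147483648) :
    max_steps x y 0 dy N = y / (-dy) := by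
  have hq : y / (-dy) ≤ y := Int.ediv_le_self _ h0
  have hx18 : y < (10:Int) ^ 18 := lt_of_le_of_lt hlt (by norm_num)
  simp only [max_steps]
  rw [if_neg (by omega : ¬ (0:Int) > 0), if_neg (by omega : ¬ (0:Int) < 0),
      if_neg (by omega : ¬ dy > 0), if_pos hdy,
      PySem.Int.floordiv_eq_ediv_of_pos (by omega : (0:Int) < -dy)]
  rw [min_eq_right (by linarith : y / (-dy) ≤ (10:Int) ^ 18)]
  rw [if_neg (by intro h; linarith [h ▸ hq])]

lemma fA_zero_left (N y : Int) (hy : 1 ≤ y) (h0N : 0 ≤ N) (hN : N ≤ 2147483648) :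
    fA N 0 y = N := by
  have hg : (Int.gcd 0 y : Int) = y := by
    rw [Int.gcd_zero_left]; exact Int.natAbs_of_nonneg (by omega)
  have hdx : PySem.Int.floordiv (-y) (Int.gcd 0 y : Int) = -1 := by
    rw [hg, PySem.Int.floordiv_eq_ediv_of_pos (by omega), Int.neg_ediv_of_dvd dvd_rfl,
        Int.ediv_self (by omega)]
  have hdy : PySem.Int.floordiv 0 (Int.gcd 0 y : Int) = 0 := by
    rw [hg, PySem.Int.floordiv_eq_ediv_of_pos (by omega), Int.zero_ediv]
  simp only [fA]
  rw [if_neg (by simp only [true_and]; omega : ¬(True ∧ y = 0)), hdx, hdy]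
  rw [max_steps_eval_n0 0 y (-1) N (by omega) le_rfl (by omega)]
  rw [show (- -1 : Int) = 1 by norm_num, show (-0 : Int) = 0 by norm_num]
  rw [max_steps_eval_p0 0 y 1 N (by omega) (by omega) (by omega)]
  simp

lemma fA_zero_right (N x : Int) (hx : 1 ≤ x) (h0N : 0 ≤ N) (hN : N ≤ 2147483648) :
    fA N x 0 = N := by
  have hg : (Int.gcd x 0 : Int) = x := by
    rw [Int.gcd_zero_right]; exact Int.natAbs_of_nonneg (by omega)
  have hdx : PySem.Int.floordiv (-0) (Int.gcd x 0 : Int) = 0 := by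
    rw [hg, PySem.Int.floordiv_eq_ediv_of_pos (by omega)]; norm_num
  have hdy : PySem.Int.floordiv x (Int.gcd x 0 : Int) = 1 := by
    rw [hg, PySem.Int.floordiv_eq_ediv_of_pos (by omega), Int.ediv_self (by omega)]
  simp only [fA]
  rw [if_neg (by simp only [and_true]; omega : ¬(x = 0 ∧ True)), hdx, hdy]
  rw [max_steps_eval_0p x 0 1 N (by omega) (by omega) (by omega)]
  rw [show (-0 : Int) = 0 by norm_num, show (-1 : Int) = -1 from rfl]
  rw [max_steps_eval_0n x 0 (-1) N (by omega) (by omega) (by omega)]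
  simp

lemma fA_interior (N x y : Int) (hx : 1 ≤ x) (hy : 1 ≤ y) (hxN : x ≤ N) (_hyN : y ≤ N)
    (hN : N ≤ 2147483648) : fA N x y = mB N x y + mB N y x := by
  have hne : ¬ (x = 0 ∧ y = 0) := by omega
  have hgne : Int.gcd x y ≠ 0 := by
    intro h
    rw [Int.gcd_eq_zero_iff] at h
    omega
  have hg : (0:Int) < (Int.gcd x y : Int) := by exact_mod_cast Nat.pos_of_ne_zero hgne
  set g : Int := (Int.gcd x y : Int) with hgdef
  have hdvx : g ∣ x := by rw [hgdef]; exact Int.gcd_dvd_left x y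
  have hdvy : g ∣ y := by rw [hgdef]; exact Int.gcd_dvd_right x y
  set a : Int := x / g with hadef
  set b : Int := y / g with hbdef
  have hxa : x = g * a := by rw [hadef]; exact (Int.mul_ediv_cancel' hdvx).symm
  have hyb : y = g * b := by rw [hbdef]; exact (Int.mul_ediv_cancel' hdvy).symm
  have ha : 1 ≤ a := by
    rw [hadef, Int.le_ediv_iff_mul_le hg]
    have := Int.le_of_dvd (by omega) hdvx
    omega
  have hb : 1 ≤ b := by
    rw [hbdef, Int.le_ediv_iff_mul_le hg]
    have := Int.le_of_dvd (by omega) hdvy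
    omega
  have hdx : PySem.Int.floordiv (-y) g = -b := by
    rw [PySem.Int.floordiv_eq_ediv_of_pos hg, Int.neg_ediv_of_dvd hdvy]
  have hdy : PySem.Int.floordiv x g = a := by
    rw [PySem.Int.floordiv_eq_ediv_of_pos hg]
  simp only [fA, if_neg hne, ← hgdef, hdx, hdy, neg_neg]
  rw [max_steps_eval_np x y (-b) a N (by omega) (by omega) (by omega) (by omega)]
  rw [max_steps_eval_pn x y b (-a) N (by omega) (by omega) (by omega) (by omega)]
  simp only [neg_neg]
  have e1 : x * g / y = x / b := by
    rw [hyb, mul_comm x g, Int.mul_ediv_mul_of_pos _ _ hg]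
  have e2 : (N - y) * g / x = (N - y) / a := by
    rw [hxa, mul_comm (N - y) g, Int.mul_ediv_mul_of_pos _ _ hg]
  have e3 : y * g / x = y / a := by
    rw [hxa, mul_comm y g, Int.mul_ediv_mul_of_pos _ _ hg]
  have e4 : (N - x) * g / y = (N - x) / b := by
    rw [hyb, mul_comm (N - x) g, Int.mul_ediv_mul_of_pos _ _ hg]
  unfold mB
  rw [PySem.Int.floordiv_eq_ediv_of_pos (by omega : (0:Int) < y),
      PySem.Int.floordiv_eq_ediv_of_pos (by omega : (0:Int) < x),
      PySem.Int.floordiv_eq_ediv_of_pos (by omega : (0:Int) < x),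
      PySem.Int.floordiv_eq_ediv_of_pos (by omega : (0:Int) < y)]
  rw [Int.gcd_comm y x]
  rw [← hgdef, e1, e2, e3, e4]
  rw [min_comm ((N - x) / b) (y / a)]

lemma sum_sum_swap (l1 l2 : List Int) (F : Int → Int → Int) :
    (l1.map (fun x => (l2.map (fun y => F x y)).sum)).sum =
    (l2.map (fun y => (l1.map (fun x => F x y)).sum)).sum := by
  induction l1 with
  | nil => simp
  | cons a t ih =>
      simp only [List.map_cons, List.sum_cons, ih, PySem.List.sum_map_add_int]

-- ===== VERDICT (by name: the statement is the Claim_ definition above) =====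
theorem euler_91_spec : Claim_equal_euler_91 := by
  intro N hdom hpre
  have hN : N ≤ 2147483648 := by
    simp [Dom_euler_91, pvDomInt] at hdom
    exact hdom.2
  have h0N : 0 ≤ N := hpre
  unfold Spec_euler_91
  rw [euler_91_eq_sum, euler_91_alt_eq_sum]
  set L : List Int := PySem.List.pyRange 1 (N + 1) 1 with hL
  have hcons : PySem.List.pyRange 0 (N + 1) 1 = 0 :: L := by
    rw [PySem.List.pyRange_one_cons (by omega : (0:Int) < N + 1), hL]
    norm_num
  have hmem : ∀ z ∈ L, 1 ≤ z ∧ z < N + 1 := fun z hz => PySem.List.mem_pyRange_one.mp (hL ▸ hz)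
  have hlen : (L.length : Int) = N := by
    rw [hL, PySem.List.length_pyRange_one]; omega
  rw [hcons]
  simp only [List.map_cons, List.sum_cons]
  have hf00 : fA N 0 0 = 0 := by simp [fA]
  have h0y : (L.map (fun y => fA N 0 y)).sum = (L.map (fun _ => N)).sum := by
    apply congrArg
    apply List.map_congr_left
    intro z hz
    exact fA_zero_left N z (hmem z hz).1 h0N hN
  have hx0 : (L.map (fun x => fA N x 0 + (L.map (fun y => fA N x y)).sum)).sum
      = (L.map (fun x => N + (L.map (fun y => mB N x y + mB N y x)).sum)).sum := by
    apply congrArg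
    apply List.map_congr_left
    intro z hz
    rw [fA_zero_right N z (hmem z hz).1 h0N hN]
    congr 1
    apply congrArg
    apply List.map_congr_left
    intro w hw
    exact fA_interior N z w (hmem z hz).1 (hmem w hw).1
      (by have := (hmem z hz).2; omega) (by have := (hmem w hw).2; omega) hN
  have houter : (L.map (fun x => N + (L.map (fun y => mB N x y + mB N y x)).sum)).sum
      = (L.length : Int) * N + (L.map (fun x => (L.map (fun y => mB N x y + mB N y x)).sum)).sum := by
    rw [PySem.List.sum_map_add_int L (fun _ => N)
        (fun x => (L.map (fun y => mB N x y + mB N y x)).sum),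
        PySem.List.sum_map_const_int]
  have hsplit : (L.map (fun x => (L.map (fun y => mB N x y + mB N y x)).sum)).sum
      = (L.map (fun x => (L.map (fun y => mB N x y)).sum)).sum
        + (L.map (fun x => (L.map (fun y => mB N y x)).sum)).sum := by
    rw [← PySem.List.sum_map_add_int]
    apply congrArg
    apply List.map_congr_left
    intro z _
    rw [PySem.List.sum_map_add_int]
  have hswap : (L.map (fun x => (L.map (fun y => mB N y x)).sum)).sum
      = (L.map (fun x => (L.map (fun y => mB N x y)).sum)).sum :=
    sum_sum_swap L L (fun x y => mB N y x)
  have h2m : (L.map (fun x => (L.map (fun y => 2 * mB N x y)).sum)).sum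
      = (L.map (fun x => (L.map (fun y => mB N x y)).sum)).sum
        + (L.map (fun x => (L.map (fun y => mB N x y)).sum)).sum := by
    rw [← PySem.List.sum_map_add_int]
    apply congrArg
    apply List.map_congr_left
    intro z _
    rw [← PySem.List.sum_map_add_int]
    apply congrArg
    apply List.map_congr_left
    intro w _
    ring
  rw [hf00, h0y, PySem.List.sum_map_const_int, hx0, houter, hsplit, hswap, h2m, hlen]
  ring
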